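-- pv_equiv track=rewrite | github.com/alokitadutta22/CorporateToxicDetector | src/utils/text_normalizer.py | _reverse_leet
-- ===== SOURCE A (Python) =====
-- CHAR_MAP = {
--     '@': 'a', '4': 'a', '^': 'a',
--     '8': 'b',
--     '(': 'c', '<': 'c', '{': 'c',
--     '3': 'e', '€': 'e',
--     '6': 'g', '9': 'g',
--     '#': 'h',
--     '!': 'i', '1': 'i', '|': 'i',
--     '7': 't', '+': 't',
--     '0': 'o',
--     '5': 's', '$': 's',
--     'v': 'v',
--     '2': 'z',
--     '*': '',   # wildcard used to mask letters
-- }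
--
-- def _reverse_leet(text: str) -> str:
--     """Replace common leet speak substitutions with letters."""
--     result = []
--     i = 0
--     while i < len(text):
--         ch = text[i]
--         if ch in CHAR_MAP:
--             # Only replace if it looks like it's being used as a letter
--             # (surrounded by letters or at word boundary)
--             prev_alpha = (i > 0 and (text[i-1].isalpha() or text[i-1] in CHAR_MAP))
--             next_alpha = (i < len(text)-1 and (text[i+1].isalpha() or text[i+1] in CHAR_MAP))
--             if prev_alpha or next_alpha:
--                 result.append(CHAR_MAP[ch])
--             else:
--                 result.append(ch)
--         else:
--             result.append(ch)
--         i += 1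
--     return ''.join(result)
-- ===== SOURCE B (Python) =====
-- CHAR_MAP = {
--     '@': 'a', '4': 'a', '^': 'a',
--     '8': 'b',
--     '(': 'c', '<': 'c', '{': 'c',
--     '3': 'e', '€': 'e',
--     '6': 'g', '9': 'g',
--     '#': 'h',
--     '!': 'i', '1': 'i', '|': 'i',
--     '7': 't', '+': 't',
--     '0': 'o',
--     '5': 's', '$': 's',
--     'v': 'v',
--     '2': 'z',
--     '*': '',
-- }
--
-- def _like(c):
--     return c.isalpha() or c in CHAR_MAP
--
-- def _reverse_leet(text: str) -> str:
--     # Segment the text into maximal runs of letter-or-leet characters.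
--     # Inside a run of length >= 2 every CHAR_MAP key is replaced; a run of
--     # length 1 (no letter-like neighbour) is kept verbatim, as is everything
--     # outside runs.
--     out = []
--     i = 0
--     n = len(text)
--     while i < n:
--         if _like(text[i]):
--             j = i
--             while j < n and _like(text[j]):
--                 j += 1
--             run = text[i:j]
--             if j - i >= 2:
--                 out.append(''.join(CHAR_MAP.get(c, c) for c in run))
--             else:
--                 out.append(run)
--             i = j
--         else:
--             out.append(text[i])
--             i += 1
--     return ''.join(out)
-- ===== Notes on version B (the rewrite author's own statement) =====
-- stated objective: alternative
-- what changed: B segments the text into maximal runs of letter-or-leet characters (an inner while scan / takeWhile) and replaces every CHAR_MAP key inside any run of length >= 2, keeping length-1 runs verbatim, instead of A's per-index loop testing each character's two neighbours.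
import Mathlib
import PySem

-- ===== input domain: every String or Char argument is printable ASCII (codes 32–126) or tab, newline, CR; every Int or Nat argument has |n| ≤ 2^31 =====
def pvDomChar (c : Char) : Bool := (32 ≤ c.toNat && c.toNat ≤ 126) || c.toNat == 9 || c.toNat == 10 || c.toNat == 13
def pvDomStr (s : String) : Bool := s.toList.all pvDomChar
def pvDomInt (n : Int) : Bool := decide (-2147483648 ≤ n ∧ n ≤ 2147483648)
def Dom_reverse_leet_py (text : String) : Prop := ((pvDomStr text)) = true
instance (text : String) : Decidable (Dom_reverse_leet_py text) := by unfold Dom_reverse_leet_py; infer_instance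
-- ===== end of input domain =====

-- B replaces A's per-index loop with neighbour tests by a run-segmentation algorithm:
-- it scans maximal runs of letter-or-leet characters and replaces every leet key inside
-- any run of length ≥ 2, keeping singleton runs and non-run characters verbatim; same cost.

-- CHAR_MAP as a lookup: some replacement iff the char is a key ('*' maps to "")
def leetVal (c : Char) : Option String :=
  match c with
  | '@' => some "a" | '4' => some "a" | '^' => some "a"
  | '8' => some "b"
  | '(' => some "c" | '<' => some "c" | '{' => some "c"
  | '3' => some "e" | '€' => some "e"
  | '6' => some "g" | '9' => some "g"
  | '#' => some "h"
  | '!' => some "i" | '1' => some "i" | '|' => some "i"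
  | '7' => some "t" | '+' => some "t"
  | '0' => some "o"
  | '5' => some "s" | '$' => some "s"
  | 'v' => some "v"
  | '2' => some "z"
  | '*' => some ""
  | _ => none

-- "c.isalpha() or c in CHAR_MAP"
def leetLike (c : Char) : Bool := PySem.Chars.isalpha c || (leetVal c).isSome

-- ===== PORT A =====
-- `while i < len(text)` with guarded neighbor lookups text[i-1] / text[i+1]; result list joined
def reverse_leet_py (text : String) : String :=
  let t := text.toList
  let n := t.length
  let result := (List.range n).foldl (fun acc i =>
    let ch := t.getD i ' '
    match leetVal ch with
    | some rep =>
        let prev_alpha := decide (0 < i) && leetLike (t.getD (i - 1) ' ')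
        let next_alpha := decide (i < n - 1) && leetLike (t.getD (i + 1) ' ')
        if prev_alpha || next_alpha then acc ++ [rep] else acc ++ [String.singleton ch]
    | none => acc ++ [String.singleton ch]) []
  String.join result

-- ===== PORT B =====
-- CHAR_MAP.get(c, c), at character-list level ('*' contributes nothing)
def mapC (c : Char) : List Char :=
  match leetVal c with
  | some rep => rep.toList
  | none => [c]

-- the run-segmentation loop of Source B: the inner `while j < n and _like(text[j])`
-- is the takeWhile/dropWhile split of the remaining text
def altGo : List Char → List Char
  | [] => []
  | c :: rest =>
      if leetLike c then
        let run := rest.takeWhile leetLike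
        let rest' := rest.dropWhile leetLike
        (if run.length + 1 ≥ 2 then (c :: run).flatMap mapC else [c]) ++ altGo rest'
      else c :: altGo rest
termination_by t => t.length
decreasing_by
  · simpa using Nat.lt_succ_of_le (rest.length_dropWhile_le leetLike)
  · simp

def reverse_leet_py_alt (text : String) : String :=
  String.ofList (altGo text.toList)

-- ===== PRECONDITION & SPEC =====
def Spec_reverse_leet_py (text : String) (out : String) : Prop := out = reverse_leet_py_alt text
instance (text : String) (out : String) : Decidable (Spec_reverse_leet_py text out) := by unfold Spec_reverse_leet_py; infer_instance

-- ===== CLAIM (what is proved, stated in full; the proofs are below) =====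
def Claim_equal_reverse_leet_py : Prop := ∀ (text : String), Dom_reverse_leet_py text → Spec_reverse_leet_py text (reverse_leet_py text)

-- ===== LEMMAS AND PROOFS =====

-- the per-position String A's loop appends at index i
def eA (t : List Char) (i : Nat) : String :=
  match leetVal (t.getD i ' ') with
  | some rep =>
      if (decide (0 < i) && leetLike (t.getD (i - 1) ' ')) ||
         (decide (i < t.length - 1) && leetLike (t.getD (i + 1) ' ')) then rep
      else String.singleton (t.getD i ' ')
  | none => String.singleton (t.getD i ' ')

-- char-level per-position value with an explicit "previous char is letter-like" flag at i = 0
def eAp (prev : Bool) (t : List Char) (i : Nat) : List Char :=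
  match leetVal (t.getD i ' ') with
  | some rep =>
      if ((if i = 0 then prev else leetLike (t.getD (i - 1) ' ')) ||
          (decide (i < t.length - 1) && leetLike (t.getD (i + 1) ' '))) then rep.toList
      else [t.getD i ' ']
  | none => [t.getD i ' ']

def headLike : List Char → Bool
  | [] => false
  | d :: _ => leetLike d

def decideC (prev : Bool) (c : Char) (nx : Bool) : List Char :=
  match leetVal c with
  | some rep => if prev || nx then rep.toList else [c]
  | none => [c]

-- A's loop rephrased as a left-to-right recursion carrying the previous char's likeness
def goC (prev : Bool) : List Char → List Char
  | [] => []
  | c :: rest => decideC prev c (headLike rest) ++ goC (leetLike c) rest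

theorem foldl_eq_map_of {α β : Type} (l : List α) (f : List β → α → List β) (e : α → β)
    (h : ∀ acc x, f acc x = acc ++ [e x]) (acc : List β) :
    l.foldl f acc = acc ++ l.map e := by
  induction l generalizing acc with
  | nil => simp
  | cons a tl ih => simp [h, ih]

theorem foldl_append_toList (l : List String) (s : String) :
    (l.foldl (· ++ ·) s).toList = s.toList ++ l.flatMap String.toList := by
  induction l generalizing s with
  | nil => simp
  | cons a t ih => simp [ih]

theorem toList_join (l : List String) : (String.join l).toList = l.flatMap String.toList := by
  simp [String.join, foldl_append_toList]

theorem eA_toList (t : List Char) (i : Nat) : (eA t i).toList = eAp false t i := by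
  unfold eA eAp
  cases h : leetVal (t.getD i ' ') with
  | none => simp
  | some rep =>
      cases i with
      | zero =>
          cases hc : (decide (0 < t.length - 1) && leetLike (t.getD (0 + 1) ' ')) <;>
            simp_all [List.getD]
      | succ j =>
          cases h1 : leetLike (t.getD j ' ') <;>
            cases h2 : (decide (j + 1 < t.length - 1) && leetLike (t.getD (j + 1 + 1) ' ')) <;>
              simp_all [List.getD]

theorem eAp_zero (prev : Bool) (c : Char) (rest : List Char) :
    eAp prev (c :: rest) 0 = decideC prev c (headLike rest) := by
  unfold eAp decideC
  cases rest with
  | nil => simp [headLike]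
  | cons d r => simp [headLike]

theorem eAp_succ (prev : Bool) (c : Char) (rest : List Char) (i : Nat) :
    eAp prev (c :: rest) (i + 1) = eAp (leetLike c) rest i := by
  unfold eAp
  have hnext : decide (i + 1 < (c :: rest).length - 1) = decide (i < rest.length - 1) := by
    simp only [List.length_cons]
    by_cases h : i + 1 < rest.length
    · rw [decide_eq_true (by omega), decide_eq_true (by omega)]
    · rw [decide_eq_false (by omega), decide_eq_false (by omega)]
  have hget : (c :: rest).getD (i + 1) ' ' = rest.getD i ' ' := by simp
  have hget2 : (c :: rest).getD (i + 2) ' ' = rest.getD (i + 1) ' ' := by simp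
  cases i with
  | zero => simp only [hnext, hget, hget2]; simp
  | succ j => simp only [hnext, hget, hget2]; simp

theorem flatMap_range_eAp (t : List Char) (prev : Bool) :
    (List.range t.length).flatMap (eAp prev t) = goC prev t := by
  induction t generalizing prev with
  | nil => simp [goC]
  | cons c rest ih =>
      simp only [List.length_cons, List.range_succ_eq_map, List.flatMap_cons, List.flatMap_map]
      rw [eAp_zero]
      have : (List.range rest.length).flatMap (fun i => eAp prev (c :: rest) (i + 1)) =
          (List.range rest.length).flatMap (eAp (leetLike c) rest) := by
        exact List.flatMap_congr (fun i _ => eAp_succ prev c rest i)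
      rw [this, ih (leetLike c)]
      rfl

theorem goC_nonlike (d : Char) (hd : leetLike d = false) (prev : Bool) (r : List Char) :
    goC prev (d :: r) = d :: goC false r := by
  have hnone : leetVal d = none := by
    cases h : leetVal d with
    | none => rfl
    | some rep => exfalso; simp [leetLike, h] at hd
  simp [goC, decideC, hnone, hd]

theorem decideC_true_mapC (c : Char) (nx : Bool) : decideC true c nx = mapC c := by
  unfold decideC mapC
  cases leetVal c <;> simp

theorem goC_run (u v : List Char) (hu : ∀ x ∈ u, leetLike x = true) :
    goC true (u ++ v) = u.flatMap mapC ++ goC true v := by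
  induction u with
  | nil => simp
  | cons x u' ih =>
      have hx := hu x (by simp)
      simp only [List.cons_append, goC, decideC_true_mapC, hx, List.flatMap_cons, List.append_assoc]
      rw [ih (fun y hy => hu y (by simp [hy]))]

theorem headLike_dropWhile (l : List Char) : headLike (l.dropWhile leetLike) = false := by
  induction l with
  | nil => rfl
  | cons x l ih =>
      by_cases h : leetLike x
      · simpa [List.dropWhile_cons, h] using ih
      · simp only [List.dropWhile_cons]
        simp only [h]
        simpa [headLike] using (by simpa using h : leetLike x = false)

theorem goC_alt (n : Nat) : ∀ t : List Char, t.length ≤ n →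
    goC false t = altGo t ∧ (headLike t = false → ∀ prev, goC prev t = altGo t) := by
  induction n with
  | zero =>
      intro t ht
      have : t = [] := List.eq_nil_of_length_eq_zero (Nat.le_zero.mp ht)
      subst this
      exact ⟨by simp [goC, altGo], fun _ _ => by simp [goC, altGo]⟩
  | succ n ih =>
      intro t ht
      cases t with
      | nil => exact ⟨by simp [goC, altGo], fun _ _ => by simp [goC, altGo]⟩
      | cons c rest =>
          have hrest : rest.length ≤ n := by simpa using ht
          have htail : ∀ prev, goC prev (rest.dropWhile leetLike) = altGo (rest.dropWhile leetLike) := by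
            intro prev
            have hlen : (rest.dropWhile leetLike).length ≤ n :=
              le_trans (rest.length_dropWhile_le leetLike) hrest
            exact (ih _ hlen).2 (headLike_dropWhile rest) prev
          have hpart2 : leetLike c = false → ∀ prev, goC prev (c :: rest) = altGo (c :: rest) := by
            intro hlc prev
            rw [goC_nonlike c hlc prev rest, (ih rest hrest).1]
            simp [altGo, hlc]
          constructor
          · cases hlc : leetLike c with
            | false => exact hpart2 hlc false
            | true =>
                have hsplit : rest.takeWhile leetLike ++ rest.dropWhile leetLike = rest :=
                  List.takeWhile_append_dropWhile
                have hallrun : ∀ x ∈ rest.takeWhile leetLike, leetLike x = true :=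
                  fun x hx => List.mem_takeWhile_imp hx
                have h1 : goC false (c :: rest) = decideC false c (headLike rest) ++ goC true rest := by
                  simp [goC, hlc]
                have h2 : goC true rest =
                    (rest.takeWhile leetLike).flatMap mapC ++ goC true (rest.dropWhile leetLike) := by
                  conv_lhs => rw [← hsplit]
                  exact goC_run _ _ hallrun
                have h3 : goC true (rest.dropWhile leetLike) = altGo (rest.dropWhile leetLike) :=
                  htail true
                cases hrun : rest.takeWhile leetLike with
                | nil =>
                    have hd : rest.dropWhile leetLike = rest := by
                      have h := hsplit; rw [hrun] at h; simpa using h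
                    have hhl : headLike rest = false := by
                      rw [← hd]; exact headLike_dropWhile rest
                    have hdec : decideC false c false = [c] := by
                      unfold decideC; cases leetVal c <;> simp
                    rw [h1, hhl, hdec]
                    have h4 : goC true rest = altGo rest := by
                      rw [← hd]; exact h3
                    rw [h4]
                    simp [altGo, hlc, hrun, hd]
                | cons c2 run2 =>
                    have hc2 : leetLike c2 = true := hallrun c2 (by rw [hrun]; simp)
                    have hrest_eq : rest = c2 :: (run2 ++ rest.dropWhile leetLike) := by
                      have h := hsplit; rw [hrun] at h; simpa using h.symm
                    have hhl : headLike rest = true := by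
                      rw [hrest_eq]; simpa [headLike] using hc2
                    have hdec : decideC false c true = mapC c := by
                      unfold decideC mapC; cases leetVal c <;> simp
                    rw [h1, hhl, hdec, h2, h3, hrun]
                    simp [altGo, hlc, hrun]
          · intro hhl prev
            have hlc : leetLike c = false := by simpa [headLike] using hhl
            exact hpart2 hlc prev

-- ===== VERDICT (by name: the statement is the Claim_ definition above) =====
theorem reverse_leet_py_spec : Claim_equal_reverse_leet_py := by
  intro text _
  unfold Spec_reverse_leet_py reverse_leet_py reverse_leet_py_alt
  simp only
  rw [foldl_eq_map_of _ _ (eA text.toList)]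
  · apply String.toList_inj.mp
    rw [toList_join, List.nil_append]
    have h1 : ((List.range text.toList.length).map (eA text.toList)).flatMap String.toList
        = (List.range text.toList.length).flatMap (eAp false text.toList) := by
      simp only [List.flatMap_map]
      exact List.flatMap_congr (fun i _ => eA_toList text.toList i)
    rw [h1, flatMap_range_eAp,
      (goC_alt text.toList.length text.toList le_rfl).1]
    simp
  · intro acc i
    simp only [eA]
    cases h : leetVal (text.toList.getD i ' ') <;> simp
    split <;> rfl
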